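-- pv_equiv track=rewrite | github.com/SleepyJay/CloneResourceMachine | CloneResourceMachine/Expected.py | fn_sum_until_zero
-- ===== SOURCE A (Python) =====
-- def fn_sum_until_zero(items):
--     result = []
--     cur_sum = 0
--     for a in items:
--         cur_sum += a
--         if a == 0:
--             result.append(cur_sum)
--             cur_sum = 0
--
--     return result
-- ===== SOURCE B (Python) =====
-- def fn_sum_until_zero(items):
--     items = list(items)
--     result = []
--     start = 0
--     for i, a in enumerate(items):
--         if a == 0:
--             result.append(sum(items[start:i + 1]))
--             start = i + 1
--     return result
-- ===== Notes on version B (the rewrite author's own statement) =====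
-- stated objective: alternative
-- what changed: Replaces the running-accumulator flush loop with an index-driven pass: it scans enumerated positions, and at each zero appends the sum of the slice items[start:i+1] and moves the start pointer, so no running sum is maintained between elements.
import Mathlib
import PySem

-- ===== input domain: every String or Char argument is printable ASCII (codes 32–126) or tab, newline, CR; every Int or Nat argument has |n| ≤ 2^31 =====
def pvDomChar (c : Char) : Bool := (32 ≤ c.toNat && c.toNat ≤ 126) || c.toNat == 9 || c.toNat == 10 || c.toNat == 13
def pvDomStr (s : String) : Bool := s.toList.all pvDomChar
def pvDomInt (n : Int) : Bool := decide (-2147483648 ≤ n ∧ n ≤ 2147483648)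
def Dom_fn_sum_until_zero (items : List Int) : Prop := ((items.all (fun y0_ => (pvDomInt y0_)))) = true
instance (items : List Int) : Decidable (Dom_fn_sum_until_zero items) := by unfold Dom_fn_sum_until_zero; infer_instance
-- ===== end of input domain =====

-- B replaces A's running-accumulator flush loop by an index-driven pass that sums the slice
-- between consecutive zeros (objective: alternative decomposition, same cost).

-- ===== PORT A =====
def fn_sum_until_zero (items : List Int) : List Int :=
  (items.foldl
    (fun (st : List Int × Int) a =>
      let c := st.2 + a
      if a = 0 then (st.1 ++ [c], 0) else (st.1, c))
    ([], 0)).1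

-- ===== PORT B =====
-- Python's built-in sum: left fold of + starting at 0
def pySumInt (xs : List Int) : Int := xs.foldl (· + ·) 0

def fn_sum_until_zero_alt (items : List Int) : List Int :=
  ((PySem.List.enumerate items 0).foldl
    (fun (st : List Int × Int) p =>
      if p.2 = 0 then
        (st.1 ++ [pySumInt (PySem.List.slice items (some st.2) (some (p.1 + 1)))], p.1 + 1)
      else st)
    ([], 0)).1

-- ===== PRECONDITION & SPEC =====
def Spec_fn_sum_until_zero (items : List Int) (out : List Int) : Prop := out = fn_sum_until_zero_alt items
instance (items : List Int) (out : List Int) : Decidable (Spec_fn_sum_until_zero items out) := by unfold Spec_fn_sum_until_zero; infer_instance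

-- ===== CLAIM (what is proved, stated in full; the proofs are below) =====
def Claim_equal_fn_sum_until_zero : Prop := ∀ (items : List Int), Dom_fn_sum_until_zero items → Spec_fn_sum_until_zero items (fn_sum_until_zero items)

-- ===== LEMMAS AND PROOFS =====

lemma pySumInt_append_singleton (l : List Int) (a : Int) :
    pySumInt (l ++ [a]) = pySumInt l + a := by
  simp [pySumInt]

lemma slice_pre_drop_succ (pre : List Int) (a : Int) (suf : List Int) (s : Nat)
    (hs : s ≤ pre.length) :
    PySem.List.slice (pre ++ a :: suf) (some (s : Int)) (some ((pre.length : Int) + 1))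
      = pre.drop s ++ [a] := by
  have h : ((pre.length : Int) + 1) = ((pre.length + 1 : Nat) : Int) := by push_cast; ring
  rw [h, PySem.List.slice_natCast, List.drop_append_of_le_length hs, List.take_append,
      List.take_of_length_le (by simp; omega)]
  have h2 : pre.length + 1 - s - (pre.drop s).length = 1 := by simp; omega
  rw [h2]
  simp

lemma loop_eq (items : List Int) :
    ∀ (suf pre res : List Int) (s : Nat), items = pre ++ suf → s ≤ pre.length →
    (suf.foldl
      (fun (st : List Int × Int) a =>
        let c := st.2 + a
        if a = 0 then (st.1 ++ [c], 0) else (st.1, c))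
      (res, pySumInt (pre.drop s))).1
    = ((PySem.List.enumerate suf (pre.length : Int)).foldl
        (fun (st : List Int × Int) p =>
          if p.2 = 0 then
            (st.1 ++ [pySumInt (PySem.List.slice items (some st.2) (some (p.1 + 1)))], p.1 + 1)
          else st)
        (res, (s : Int))).1 := by
  intro suf
  induction suf with
  | nil => intro pre res s _ _; simp [PySem.List.enumerate_nil]
  | cons a rest ih =>
    intro pre res s hitems hs
    rw [PySem.List.enumerate_cons]
    simp only [List.foldl_cons]
    by_cases ha : a = 0
    · subst ha
      simp only [add_zero]
      have hsl : PySem.List.slice items (some (s : Int)) (some ((pre.length : Int) + 1))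
          = pre.drop s ++ [0] := by
        rw [hitems]; exact slice_pre_drop_succ pre 0 rest s hs
      rw [hsl, pySumInt_append_singleton, add_zero]
      have ihh := ih (pre ++ [0]) (res ++ [pySumInt (pre.drop s)]) (pre.length + 1)
        (by rw [hitems]; simp) (by simp)
      have hd : ((pre ++ [(0 : Int)]).drop (pre.length + 1)) = [] := by simp
      rw [hd] at ihh
      have hz : pySumInt ([] : List Int) = 0 := by simp [pySumInt]
      rw [hz] at ihh
      simp only [List.length_append, List.length_cons, List.length_nil] at ihh
      push_cast at ihh ⊢
      exact ihh
    · simp only [if_neg ha]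
      have ihh := ih (pre ++ [a]) res s (by rw [hitems]; simp) (by simp; omega)
      have h2 : ((pre ++ [a]).drop s) = pre.drop s ++ [a] :=
        List.drop_append_of_le_length hs
      rw [h2, pySumInt_append_singleton] at ihh
      simp only [List.length_append, List.length_cons, List.length_nil] at ihh
      push_cast at ihh ⊢
      exact ihh

-- ===== VERDICT (by name: the statement is the Claim_ definition above) =====
theorem fn_sum_until_zero_spec : Claim_equal_fn_sum_until_zero := by
  intro items _
  unfold Spec_fn_sum_until_zero fn_sum_until_zero fn_sum_until_zero_alt
  have := loop_eq items items [] [] 0 (by simp) (by simp)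
  simpa [pySumInt] using this
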